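-- pv_equiv track=rewrite | github.com/lucaslopez284/Python2026_Entrega_Practica_Dos | src/ejercicio_04.py | punto_despues_del_arroba
-- ===== SOURCE A (Python) =====
-- def punto_despues_del_arroba(email)-> bool:
--     auxiliar = -1
--     for indice, caracter in enumerate(email):
--         if caracter == "@":
--             auxiliar = indice
--             break
--     if auxiliar > 0:
--         copia = email[auxiliar:]
--         return copia.count(".") >= 1
--     else:
--         return False
-- ===== SOURCE B (Python) =====
-- def punto_despues_del_arroba(email) -> bool:
--     # single-pass 3-state machine: 0 = no char seen yet, 1 = inside non-empty
--     # prefix before '@', 2 = after the first '@'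
--     state = 0
--     for c in email:
--         if state == 0:
--             if c == "@":
--                 return False  # '@' at position 0: empty local part
--             state = 1
--         elif state == 1:
--             if c == "@":
--                 state = 2
--         else:
--             if c == ".":
--                 return True
--     return False
-- ===== Notes on version B (the rewrite author's own statement) =====
-- stated objective: alternative
-- what changed: Replaces A's staged locate-the-'@'-then-count-dots-in-a-slice approach with a single left-to-right pass driven by a three-state machine (before-first-char / in-prefix / after-'@') that returns early and never builds a slice.
import Mathlib
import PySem

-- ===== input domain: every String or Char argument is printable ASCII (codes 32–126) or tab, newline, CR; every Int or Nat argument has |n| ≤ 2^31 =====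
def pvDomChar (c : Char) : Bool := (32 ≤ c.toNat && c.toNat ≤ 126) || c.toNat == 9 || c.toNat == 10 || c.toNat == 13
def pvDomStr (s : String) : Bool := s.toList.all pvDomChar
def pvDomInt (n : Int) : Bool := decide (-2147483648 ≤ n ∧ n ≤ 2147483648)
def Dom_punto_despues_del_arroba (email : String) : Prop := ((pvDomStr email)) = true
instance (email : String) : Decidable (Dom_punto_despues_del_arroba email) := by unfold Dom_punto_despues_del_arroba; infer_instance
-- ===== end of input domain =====

/-
  punto_despues_del_arroba: B replaces A's staged locate-'@'-then-count-dots-in-a-slice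
  approach with a single left-to-right pass driven by a three-state machine (alternative
  decomposition; no slice, early return).
-/


-- ===== PORT A =====
-- loop 'for indice, caracter in enumerate(email): if caracter == "@": auxiliar = indice; break'
def pvScanA : List (Int × Char) → Int → Int
  | [], aux => aux
  | (i, c) :: rest, aux => if c == '@' then i else pvScanA rest aux

def punto_despues_del_arroba (email : String) : Bool :=
  let auxiliar := pvScanA (PySem.List.enumerate email.toList 0) (-1)
  if auxiliar > 0 then
    let copia := PySem.Str.slice email (some auxiliar) none
    decide (PySem.Str.count copia "." ≥ 1)
  else
    false

-- ===== PORT B =====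
-- state 0 = no char seen yet, 1 = inside non-empty prefix before '@', 2 = after first '@';
-- 'return False'/'return True' become the literal results, the for-loop is the recursion
def pvDfaB : List Char → Nat → Bool
  | [], _ => false
  | c :: rest, 0 => if c == '@' then false else pvDfaB rest 1
  | c :: rest, 1 => if c == '@' then pvDfaB rest 2 else pvDfaB rest 1
  | c :: rest, _ => if c == '.' then true else pvDfaB rest 2

def punto_despues_del_arroba_alt (email : String) : Bool :=
  pvDfaB email.toList 0

-- ===== PRECONDITION & SPEC =====
def Spec_punto_despues_del_arroba (email : String) (out : Bool) : Prop := out = punto_despues_del_arroba_alt email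
instance (email : String) (out : Bool) : Decidable (Spec_punto_despues_del_arroba email out) := by unfold Spec_punto_despues_del_arroba; infer_instance

-- ===== CLAIM (what is proved, stated in full; the proofs are below) =====
def Claim_equal_punto_despues_del_arroba : Prop := ∀ (email : String), Dom_punto_despues_del_arroba email → Spec_punto_despues_del_arroba email (punto_despues_del_arroba email)

-- ===== LEMMAS AND PROOFS =====
theorem pvClampIdx_of_bounds (n : Nat) (a : Int) (h0 : 0 ≤ a) (h1 : a ≤ n) :
    PySem.List.clampIdx n a = a.toNat := by
  rw [PySem.List.clampIdx, if_neg (by omega)]; omega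

theorem pvCountGo_singleton (c : Char) (cs : List Char) (fuel acc : Nat) (h : cs.length ≤ fuel) :
    PySem.Chars.count.go [c] fuel cs acc = acc + cs.count c := by
  induction cs generalizing fuel acc with
  | nil => cases fuel <;> simp [PySem.Chars.count.go]
  | cons hd t ih =>
    cases fuel with
    | zero => simp at h
    | succ f =>
      rw [PySem.Chars.count.go]
      by_cases hc : c = hd
      · subst hc
        have hp : [c].isPrefixOf (c :: t) = true := by simp [List.isPrefixOf]
        simp only [hp, if_true]
        have hd1 : List.drop [c].length (c :: t) = t := rfl
        rw [hd1, ih f (acc + 1) (by simpa using h)]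
        simp
        omega
      · have hp : [c].isPrefixOf (hd :: t) = false := by simp [List.isPrefixOf, hc]
        simp only [hp, Bool.false_eq_true, if_false]
        rw [ih f acc (by simpa using h)]
        simp [Ne.symm hc]

theorem pvCount_singleton (cs : List Char) (c : Char) :
    PySem.Chars.count cs [c] = cs.count c := by
  rw [PySem.Chars.count]
  simp [pvCountGo_singleton c cs cs.length 0 le_rfl]

theorem pvScanA_of_not_mem (cs : List Char) (s aux : Int) (h : '@' ∉ cs) :
    pvScanA (PySem.List.enumerate cs s) aux = aux := by
  induction cs generalizing s with
  | nil => simp [PySem.List.enumerate_nil, pvScanA]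
  | cons c rest ih =>
    rw [PySem.List.enumerate_cons]
    simp only [List.mem_cons, not_or] at h
    simp [pvScanA, Ne.symm h.1, ih _ h.2]

theorem pvScanA_of_prefix (p t : List Char) (s aux : Int) (hp : '@' ∉ p) :
    pvScanA (PySem.List.enumerate (p ++ '@' :: t) s) aux = s + p.length := by
  induction p generalizing s with
  | nil => simp [PySem.List.enumerate_cons, pvScanA]
  | cons c rest ih =>
    simp only [List.mem_cons, not_or] at hp
    rw [List.cons_append, PySem.List.enumerate_cons]
    simp only [pvScanA, beq_iff_eq, Ne.symm hp.1, if_false]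
    rw [ih _ hp.2]
    simp only [List.length_cons]
    push_cast
    ring

theorem pvSplitFirstAt (cs : List Char) (h : '@' ∈ cs) :
    ∃ p t, cs = p ++ '@' :: t ∧ '@' ∉ p := by
  induction cs with
  | nil => simp at h
  | cons c rest ih =>
    by_cases hc : c = '@'
    · exact ⟨[], rest, by simp [hc], by simp⟩
    · obtain ⟨p, t, hpt, hnp⟩ := ih (by rcases List.mem_cons.mp h with h1 | h2
                                        · exact absurd h1.symm hc
                                        · exact h2)
      exact ⟨c :: p, t, by simp [hpt], by simp [hnp, Ne.symm hc]⟩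

theorem pvDfaB_two (cs : List Char) : pvDfaB cs 2 = decide ('.' ∈ cs) := by
  induction cs with
  | nil => simp [pvDfaB]
  | cons c rest ih =>
    by_cases hc : c = '.'
    · simp [pvDfaB, hc]
    · simp [pvDfaB, hc, ih, Ne.symm hc]

theorem pvDfaB_one_no_at (cs : List Char) (h : '@' ∉ cs) : pvDfaB cs 1 = false := by
  induction cs with
  | nil => rfl
  | cons c rest ih =>
    simp only [List.mem_cons, not_or] at h
    simp [pvDfaB, Ne.symm h.1, ih h.2]

theorem pvDfaB_one_at (p t : List Char) (hp : '@' ∉ p) :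
    pvDfaB (p ++ '@' :: t) 1 = decide ('.' ∈ t) := by
  induction p with
  | nil => simp [pvDfaB, pvDfaB_two]
  | cons c rest ih =>
    simp only [List.mem_cons, not_or] at hp
    rw [List.cons_append]
    simp [pvDfaB, Ne.symm hp.1, ih hp.2]

-- ===== VERDICT (by name: the statement is the Claim_ definition above) =====
theorem punto_despues_del_arroba_spec : Claim_equal_punto_despues_del_arroba := by
  intro email _hdom
  unfold Spec_punto_despues_del_arroba punto_despues_del_arroba punto_despues_del_arroba_alt
  cases hcs : email.toList with
  | nil =>
    simp [PySem.List.enumerate_nil, pvScanA, pvDfaB]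
  | cons c rest =>
    by_cases hc : c = '@'
    · subst hc
      rw [PySem.List.enumerate_cons]
      simp [pvScanA, pvDfaB]
    · by_cases hm : '@' ∈ rest
      · obtain ⟨p, t, hpt, hnp⟩ := pvSplitFirstAt rest hm
        subst hpt
        have hscan : pvScanA (PySem.List.enumerate (c :: (p ++ '@' :: t)) 0) (-1)
            = 1 + p.length := by
          rw [PySem.List.enumerate_cons]
          simp only [pvScanA, beq_iff_eq, hc, if_false]
          exact pvScanA_of_prefix p t 1 (-1) hnp
        rw [hscan]
        have hpos : (0 : Int) < 1 + p.length := by positivity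
        rw [if_pos hpos]
        have hdrop : (PySem.Str.slice email (some (1 + p.length)) none).toList = '@' :: t := by
          rw [PySem.Str.toList_slice, PySem.Chars.slice_eq_listSlice, PySem.List.slice_some_none,
            pvClampIdx_of_bounds _ _ (by positivity) (by rw [hcs]; simp; omega)]
          have h1 : ((1 : Int) + p.length).toNat = p.length + 1 := by omega
          rw [hcs, h1, List.drop_succ_cons, List.drop_left]
        have hcount : PySem.Str.count (PySem.Str.slice email (some (1 + p.length)) none) "."
            = t.count '.' := by
          rw [PySem.Str.count, hdrop]
          have h2 : (".".toList) = ['.'] := rfl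
          rw [h2, pvCount_singleton]
          simp
        simp only []
        rw [hcount]
        have hdfa : pvDfaB (c :: (p ++ '@' :: t)) 0 = decide ('.' ∈ t) := by
          simp only [pvDfaB, beq_iff_eq, hc, if_false]
          exact pvDfaB_one_at p t hnp
        rw [hdfa]
        exact decide_eq_decide.mpr (by rw [ge_iff_le, Nat.one_le_iff_ne_zero,
          ← Nat.pos_iff_ne_zero, List.count_pos_iff])
      · have hscan : pvScanA (PySem.List.enumerate (c :: rest) 0) (-1) = -1 := by
          exact pvScanA_of_not_mem _ _ _ (by simp [Ne.symm hc, hm])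
        rw [hscan, if_neg (by omega)]
        simp only [pvDfaB, beq_iff_eq, hc, if_false]
        exact (pvDfaB_one_no_at rest hm).symm
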